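-- pv_equiv track=rewrite | github.com/JWhan96/TIL | Algorithm/Swea/IM/4th_class/8_25/ppp.py | generate_sublists
-- ===== SOURCE A (Python) =====
-- def generate_sublists(lst, num_sublists):
--     if num_sublists == 1:
--         return [[lst]]
--
--     result = []
--     for i in range(1, len(lst)):
--         for sub_list in generate_sublists(lst[i:], num_sublists - 1):
--             result.append([lst[:i]] + sub_list)
--
--     return result
-- ===== SOURCE B (Python) =====
-- def generate_sublists(lst, num_sublists):
--     # Bottom-up DP over suffixes: prev[j] holds all partitions of lst[j:]
--     # into the current number of parts, so shared suffix partitions are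
--     # computed once instead of being re-derived by naive recursion.
--     if num_sublists < 1:
--         return []
--     n = len(lst)
--     if num_sublists > max(n, 1):
--         return []  # cannot split n elements into more than max(n, 1) non-empty parts
--     prev = [[[lst[j:]]] for j in range(n + 1)]
--     for _ in range(num_sublists - 1):
--         prev = [[[lst[j:i]] + sub for i in range(j + 1, n) for sub in prev[i]]
--                 for j in range(n + 1)]
--     return prev[0]
-- ===== Notes on version B (the rewrite author's own statement) =====
-- stated objective: alternative
-- what changed: Replaces A's naive top-down recursion over suffixes with an iterative bottom-up dynamic-programming table indexed by suffix start position, so each suffix's partitions are computed once and shared instead of re-derived by repeated recursive calls.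
import Mathlib
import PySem

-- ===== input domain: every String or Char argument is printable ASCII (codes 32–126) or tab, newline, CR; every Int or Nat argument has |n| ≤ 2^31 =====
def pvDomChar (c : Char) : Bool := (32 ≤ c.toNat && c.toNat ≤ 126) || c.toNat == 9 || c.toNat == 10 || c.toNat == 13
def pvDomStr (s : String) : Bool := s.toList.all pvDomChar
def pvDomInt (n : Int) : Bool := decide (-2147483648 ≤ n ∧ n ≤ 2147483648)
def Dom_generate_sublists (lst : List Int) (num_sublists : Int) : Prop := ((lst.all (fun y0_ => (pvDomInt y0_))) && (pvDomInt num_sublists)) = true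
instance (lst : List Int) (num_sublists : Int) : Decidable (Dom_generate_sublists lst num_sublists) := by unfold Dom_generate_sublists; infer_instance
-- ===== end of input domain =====

-- B replaces A's naive recursion over suffixes by a bottom-up DP table over suffix start
-- positions (objective: alternative — shared suffix partitions are computed once).

-- ===== PORT A =====
-- A: if num_sublists == 1 return [[lst]]; else for i in range(1, len(lst)):
--      for sub_list in generate_sublists(lst[i:], num_sublists-1): result.append([lst[:i]] + sub_list)
def generate_sublists (lst : List Int) (num_sublists : Int) : List (List (List Int)) :=
  if num_sublists == 1 then [[lst]]
  else
    (PySem.List.pyRange 1 lst.length 1).attach.foldl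
      (fun result i =>
        result ++
          (generate_sublists (PySem.List.slice lst (some i.1) none) (num_sublists - 1)).map
            (fun sub_list => [PySem.List.slice lst none (some i.1)] ++ sub_list))
      []
termination_by lst.length
decreasing_by
  rcases PySem.List.mem_pyRange_one.mp i.2 with ⟨h1, h2⟩
  rw [PySem.List.slice_from lst (by omega)]
  simp only [List.length_drop]
  omega

-- ===== PORT B =====
-- helper: one pass of Source B's loop body (the nested list comprehension refining prev)
def altStep (lst : List Int) (prev : List (List (List (List Int)))) : List (List (List (List Int))) :=
  (List.range (lst.length + 1)).map (fun (j : Nat) =>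
    (PySem.List.pyRange ((j : Int) + 1) (lst.length : Int) 1).flatMap
      (fun i => (PySem.List.pyGetD prev i []).map
        (fun sub => [PySem.List.slice lst (some (j : Int)) (some i)] ++ sub)))

def generate_sublists_alt (lst : List Int) (num_sublists : Int) : List (List (List Int)) :=
  if num_sublists < 1 then []
  else if num_sublists > max (lst.length : Int) 1 then []   -- no partition into that many non-empty parts
  else
    PySem.List.pyGetD
      ((List.range ((num_sublists - 1).toNat)).foldl (fun prev _ => altStep lst prev)
        ((List.range (lst.length + 1)).map (fun (j : Nat) => [[PySem.List.slice lst (some (j : Int)) none]])))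
      0 []

-- ===== PRECONDITION & SPEC =====
def Spec_generate_sublists (lst : List Int) (num_sublists : Int) (out : List (List (List Int))) : Prop := out = generate_sublists_alt lst num_sublists
instance (lst : List Int) (num_sublists : Int) (out : List (List (List Int))) : Decidable (Spec_generate_sublists lst num_sublists out) := by unfold Spec_generate_sublists; infer_instance

-- ===== CLAIM (what is proved, stated in full; the proofs are below) =====
def Claim_equal_generate_sublists : Prop := ∀ (lst : List Int) (num_sublists : Int), Dom_generate_sublists lst num_sublists → Spec_generate_sublists lst num_sublists (generate_sublists lst num_sublists)

-- ===== LEMMAS AND PROOFS =====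

-- A's loop as a flatMap (its non-base branch), for any num_sublists ≠ 1
lemma A_unfold (lst : List Int) (k : Int) (hk : k ≠ 1) :
    generate_sublists lst k =
      (PySem.List.pyRange 1 lst.length 1).flatMap
        (fun i => (generate_sublists (PySem.List.slice lst (some i) none) (k - 1)).map
          (fun sub => [PySem.List.slice lst none (some i)] ++ sub)) := by
  rw [generate_sublists]
  simp only [beq_iff_eq, hk, if_false]
  exact (List.foldl_attach (l := PySem.List.pyRange 1 (lst.length : Int) 1)
      (f := fun result i => result ++
        (generate_sublists (PySem.List.slice lst (some i) none) (k - 1)).map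
          (fun sub_list => [PySem.List.slice lst none (some i)] ++ sub_list))
      (b := [])).trans
    (by rw [PySem.List.foldl_append_eq_flatMap, List.nil_append])

lemma A_one (lst : List Int) : generate_sublists lst 1 = [[lst]] := by
  rw [generate_sublists]
  simp

-- A returns [] when num_sublists ≤ 0 (the recursion never hits the base case) and when
-- num_sublists exceeds the number of elements (and is ≥ 2): no partition exists
lemma A_empty : ∀ (n : Nat) (lst : List Int), lst.length = n → ∀ (k : Int),
    (k ≤ 0 ∨ ((lst.length : Int) < k ∧ 2 ≤ k)) → generate_sublists lst k = [] := by
  intro n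
  induction n using Nat.strong_induction_on with
  | _ n ih =>
    intro lst hn k hk
    rw [A_unfold lst k (by omega), List.flatMap_eq_nil_iff]
    intro i hi
    rcases PySem.List.mem_pyRange_one.mp hi with ⟨h1, h2⟩
    have hslice : (PySem.List.slice lst (some i) none).length = lst.length - i.toNat := by
      rw [PySem.List.slice_from lst (by omega)]; simp only [List.length_drop]
    rw [ih (PySem.List.slice lst (some i) none).length (by omega) _ rfl (k - 1)
        (by rcases hk with h | ⟨h, h'⟩
            · exact Or.inl (by omega)
            · exact Or.inr (by rw [hslice]; omega))]
    simp

-- shifting an integer range by a constant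
lemma pyRange_shift (c a b : Int) :
    PySem.List.pyRange (a + c) (b + c) 1 = (PySem.List.pyRange a b 1).map (· + c) := by
  rw [PySem.List.pyRange_of_pos a b (by norm_num),
    PySem.List.pyRange_of_pos (a + c) (b + c) (by norm_num), List.map_map]
  have hif : (a + c < b + c) ↔ (a < b) := by omega
  have harg : b + c - (a + c) + 1 - 1 = b - a + 1 - 1 := by ring
  rw [harg]
  simp only [hif]
  exact List.map_congr_left (fun k _ => by simp; ring)

-- a loop that ignores its index is an iterate
lemma foldl_range_const {α : Type} (g : α → α) (i : α) (t : Nat) :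
    (List.range t).foldl (fun a _ => g a) i = g^[t] i := by
  induction t generalizing i with
  | zero => simp
  | succ t ih =>
    rw [List.range_succ, List.foldl_append, List.foldl_cons, List.foldl_nil, ih,
      ← Function.iterate_succ_apply' g t i]

-- the DP invariant: after t passes, entry j of the table is A on the suffix lst.drop j with t+1 parts
lemma B_inv (lst : List Int) (t : Nat) :
    (altStep lst)^[t]
        ((List.range (lst.length + 1)).map (fun (j : Nat) => [[PySem.List.slice lst (some (j : Int)) none]]))
      = (List.range (lst.length + 1)).map
          (fun (j : Nat) => generate_sublists (lst.drop j) ((t : Int) + 1)) := by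
  induction t with
  | zero =>
    simp only [Function.iterate_zero, id_eq, Nat.cast_zero, zero_add]
    refine List.map_congr_left (fun j hj => ?_)
    rw [A_one, PySem.List.slice_from lst (by positivity)]
    simp
  | succ t ih =>
    rw [Function.iterate_succ_apply', ih]
    unfold altStep
    refine List.map_congr_left (fun j hj => ?_)
    simp only [List.mem_range] at hj
    rw [A_unfold (lst.drop j) (((t : Nat) + 1 : Nat) + 1) (by omega), List.length_drop,
      Nat.cast_sub (by omega)]
    have hshift := pyRange_shift (j : Int) 1 ((lst.length : Int) - j)
    rw [show (1 : Int) + (j : Int) = (j : Int) + 1 by ring,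
      show ((lst.length : Int) - j) + j = (lst.length : Int) by ring] at hshift
    rw [hshift, List.flatMap_map]
    refine List.flatMap_congr (fun i hi => ?_)
    rcases PySem.List.mem_pyRange_one.mp hi with ⟨h1, h2⟩
    have h2' : i < (lst.length : Int) - j := h2
    have hidx : PySem.List.pyGetD
        ((List.range (lst.length + 1)).map (fun (j : Nat) => generate_sublists (lst.drop j) ((t : Int) + 1)))
        (i + (j : Int)) []
        = generate_sublists (lst.drop (i + (j : Int)).toNat) ((t : Int) + 1) := by
      rw [PySem.List.pyGetD_eq_getElem _ _ (by omega)
        (by simp only [List.length_map, List.length_range]; push_cast; omega)]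
      simp only [List.getElem_map, List.getElem_range]
    rw [hidx]
    have hdrop : PySem.List.slice (lst.drop j) (some i) none = lst.drop (i + (j : Int)).toNat := by
      rw [PySem.List.slice_from _ (by omega), List.drop_drop]
      congr 1
      omega
    have htake : PySem.List.slice lst (some (j : Int)) (some (i + (j : Int)))
        = PySem.List.slice (lst.drop j) none (some i) := by
      rw [PySem.List.slice_toNat lst (by positivity) (by omega),
        PySem.List.slice_to _ (by omega)]
      simp only [Int.toNat_natCast]
      congr 1
      omega
    rw [hdrop, htake]
    norm_num

-- ===== VERDICT (by name: the statement is the Claim_ definition above) =====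
theorem generate_sublists_spec : Claim_equal_generate_sublists := by
  intro lst k _
  unfold Spec_generate_sublists generate_sublists_alt
  by_cases hk : k < 1
  · rw [if_pos hk, A_empty lst.length lst rfl k (Or.inl (by omega))]
  · rw [if_neg hk]
    by_cases hk2 : k > max (lst.length : Int) 1
    · rw [if_pos hk2, A_empty lst.length lst rfl k (Or.inr (by omega))]
    · rw [if_neg hk2, foldl_range_const, B_inv]
      have hcast : (((k - 1).toNat : Int) + 1) = k := by omega
      rw [hcast,
        PySem.List.pyGetD_eq_getElem _ _ (by omega)
          (by simp only [List.length_map, List.length_range]; push_cast; omega)]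
      simp
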